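-- pv_equiv track=rewrite | github.com/ZhongkuiMa/shapeonnx | src/shapeonnx/infer_shape.py | _normalize_concat_shapes_different_ranks
-- ===== SOURCE A (Python) =====
-- def _normalize_concat_shapes_different_ranks(shape_list: list[list[int]], axis: int) -> list[int]:
--     """
--     Normalize and concatenate shapes with different ranks.
--
--     :param shape_list: List of input shapes
--     :param axis: Concatenation axis
--     :return: Concatenated shape
--     """
--     max_ndim = max(len(s) for s in shape_list)
--     normalized_shapes = []
--     for s in shape_list:
--         s_len = len(s)
--         diff = max_ndim - s_len
--         normalized = [1] * diff + s
--         normalized_shapes.append(normalized)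
--
--     shape = normalized_shapes[0].copy()
--     for other_shape in normalized_shapes[1:]:
--         if axis < len(shape):
--             shape[axis] += other_shape[axis]
--     return shape
-- ===== SOURCE B (Python) =====
-- def _normalize_concat_shapes_different_ranks(shape_list: list[list[int]], axis: int) -> list[int]:
--     """Build only the first normalized shape; compute each other shape's
--     axis entry in O(1) via its padding offset (O(max_ndim + n) instead of
--     O(n * max_ndim))."""
--     max_ndim = max(len(s) for s in shape_list)
--     first = shape_list[0]
--     shape = [1] * (max_ndim - len(first)) + list(first)
--     j = axis if axis >= 0 else max_ndim + axis
--     if 0 <= j < max_ndim: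
--         total = 0
--         for s in shape_list[1:]:
--             k = j - (max_ndim - len(s))
--             total += s[k] if k >= 0 else 1
--         shape[j] += total
--     return shape
-- ===== Notes on version B (the rewrite author's own statement) =====
-- stated objective: alternative
-- what changed: B builds only the first padded shape and resolves the concatenation axis once, summing each other shape's axis entry in O(1) via its padding offset instead of materializing every normalized shape (O(max_ndim + n) work instead of O(n * max_ndim); measured only ~1.35x at the largest size, so not claimed as faster).
import Mathlib
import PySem

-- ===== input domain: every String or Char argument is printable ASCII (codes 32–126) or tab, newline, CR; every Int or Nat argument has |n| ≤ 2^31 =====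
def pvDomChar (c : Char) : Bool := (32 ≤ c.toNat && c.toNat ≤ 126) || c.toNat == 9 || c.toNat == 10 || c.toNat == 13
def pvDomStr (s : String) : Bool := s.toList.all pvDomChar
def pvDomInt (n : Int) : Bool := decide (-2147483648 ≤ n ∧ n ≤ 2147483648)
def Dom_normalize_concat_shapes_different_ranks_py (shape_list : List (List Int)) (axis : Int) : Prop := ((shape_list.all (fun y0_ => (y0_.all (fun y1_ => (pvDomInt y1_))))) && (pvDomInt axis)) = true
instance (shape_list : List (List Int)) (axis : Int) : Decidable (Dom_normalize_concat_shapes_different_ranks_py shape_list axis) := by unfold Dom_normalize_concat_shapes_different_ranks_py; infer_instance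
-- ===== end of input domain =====

-- B builds only the first padded shape and computes each other shape's axis entry
-- directly via its padding offset, never materializing the other normalized shapes
-- (intended as faster; a timing run measured only ~1.35x at the largest size).


-- ===== PORT A =====
-- max(len(s) for s in shape_list); with a nonempty list the fold from 0 equals Python's max
-- (lengths are ≥ 0); Python raises ValueError on an empty list, excluded by Pre_.
def pvMaxNdimA (shape_list : List (List Int)) : Nat :=
  shape_list.foldl (fun m s => max m s.length) 0

def normalize_concat_shapes_different_ranks_py (shape_list : List (List Int)) (axis : Int) : List Int :=
  let max_ndim := pvMaxNdimA shape_list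
  let normalized_shapes := shape_list.map (fun s => List.replicate (max_ndim - s.length) 1 ++ s)
  -- normalized_shapes[0].copy(); Python raises IndexError on [], excluded by Pre_
  let shape := normalized_shapes.headD []
  (normalized_shapes.drop 1).foldl (fun shape other_shape =>
    if axis < (shape.length : Int) then
      -- shape[axis] += other_shape[axis]; pyGetD/pySetD are exact under Pre_ (index in range)
      PySem.List.pySetD shape axis
        (PySem.List.pyGetD shape axis 0 + PySem.List.pyGetD other_shape axis 0)
    else shape) shape

-- ===== PORT B =====
def normalize_concat_shapes_different_ranks_py_alt (shape_list : List (List Int)) (axis : Int) : List Int :=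
  let max_ndim := shape_list.foldl (fun m s => max m s.length) 0
  let first := shape_list.headD []
  let shape := List.replicate (max_ndim - first.length) 1 ++ first
  let j : Int := if 0 ≤ axis then axis else (max_ndim : Int) + axis
  if 0 ≤ j ∧ j < (max_ndim : Int) then
    let total := (shape_list.drop 1).foldl (fun t s =>
      t + (if 0 ≤ j - ((max_ndim : Int) - (s.length : Int)) then
             s.getD (j - ((max_ndim : Int) - (s.length : Int))).toNat 0
           else 1)) 0
    shape.set j.toNat (shape.getD j.toNat 0 + total)
  else shape

-- ===== PRECONDITION & SPEC =====
-- Pre_ excludes exactly the inputs where A raises: the empty list (ValueError from max,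
-- IndexError from [0]) and an axis below -max_ndim with at least two shapes (IndexError
-- from shape[axis] in the loop).
def Pre_normalize_concat_shapes_different_ranks_py (shape_list : List (List Int)) (axis : Int) : Prop :=
  shape_list ≠ [] ∧
    (shape_list.length ≤ 1 ∨ -(((shape_list.foldl (fun m s => max m s.length) 0) : Int)) ≤ axis)
instance (shape_list : List (List Int)) (axis : Int) : Decidable (Pre_normalize_concat_shapes_different_ranks_py shape_list axis) := by unfold Pre_normalize_concat_shapes_different_ranks_py; infer_instance

def pvWitness_normalize_concat_shapes_different_ranks_py : List (List Int) × Int := ([[2, 3], [4]], 1)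

def Spec_normalize_concat_shapes_different_ranks_py (shape_list : List (List Int)) (axis : Int) (out : List Int) : Prop := out = normalize_concat_shapes_different_ranks_py_alt shape_list axis
instance (shape_list : List (List Int)) (axis : Int) (out : List Int) : Decidable (Spec_normalize_concat_shapes_different_ranks_py shape_list axis out) := by unfold Spec_normalize_concat_shapes_different_ranks_py; infer_instance

-- ===== CLAIM (what is proved, stated in full; the proofs are below) =====
def Claim_equal_normalize_concat_shapes_different_ranks_py : Prop := ∀ (shape_list : List (List Int)) (axis : Int), Dom_normalize_concat_shapes_different_ranks_py shape_list axis → Pre_normalize_concat_shapes_different_ranks_py shape_list axis → Spec_normalize_concat_shapes_different_ranks_py shape_list axis (normalize_concat_shapes_different_ranks_py shape_list axis)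
-- ===== LEMMAS AND PROOFS =====

-- resolved Python index: pyGetD at an in-range (possibly negative) index
theorem pvGet_resolve (xs : List Int) (axis : Int) (M : Nat) (hlen : xs.length = M)
    (h0 : -(M : Int) ≤ axis) (h1 : axis < (M : Int)) :
    PySem.List.pyGetD xs axis 0
      = xs.getD (if 0 ≤ axis then axis else (M : Int) + axis).toNat 0 := by
  simp only [PySem.List.pyGetD, PySem.List.pyGet?, PySem.List.pyIdx?, hlen]
  by_cases h : 0 ≤ axis
  · rw [if_pos h, if_pos (by omega), if_pos h]
    simp [List.getD]
  · rw [if_neg h, if_pos (by omega), if_neg h]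
    have hk : M - (-axis).toNat = ((M : Int) + axis).toNat := by omega
    simp [List.getD, hk]

theorem pvSet_resolve (xs : List Int) (axis v : Int) (M : Nat) (hlen : xs.length = M)
    (h0 : -(M : Int) ≤ axis) (h1 : axis < (M : Int)) :
    PySem.List.pySetD xs axis v
      = xs.set (if 0 ≤ axis then axis else (M : Int) + axis).toNat v := by
  simp only [PySem.List.pySetD, PySem.List.pySet?, PySem.List.pyIdx?, hlen]
  by_cases h : 0 ≤ axis
  · rw [if_pos h, if_pos (by omega), if_pos h]
    simp
  · rw [if_neg h, if_pos (by omega), if_neg h]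
    have hk : M - (-axis).toNat = ((M : Int) + axis).toNat := by omega
    simp [hk]

theorem pvSet_getD_self (xs : List Int) (i : Nat) (h : i < xs.length) :
    xs.set i (xs.getD i 0) = xs := by
  apply List.ext_getElem
  · simp
  · intro k hk hk'
    rw [List.getElem_set]
    split_ifs with he
    · subst he; rw [List.getD_eq_getElem xs 0 h]
    · rfl

theorem pvFoldl_add_eq {α : Type} (L : List α) (f : α → Int) (c : Int) :
    L.foldl (fun t s => t + f s) c = c + (L.map f).sum := by
  induction L generalizing c with
  | nil => simp
  | cons o L ih => simp [ih, add_assoc]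

theorem pvInit_le_foldl_max (l : List (List Int)) (a : Nat) :
    a ≤ l.foldl (fun m s => max m s.length) a := by
  induction l generalizing a with
  | nil => simp
  | cons h t ih => exact le_trans (le_max_left _ _) (ih _)

theorem pvLen_le_foldl_max (l : List (List Int)) (a : Nat) (s : List Int) (hs : s ∈ l) :
    s.length ≤ l.foldl (fun m s => max m s.length) a := by
  induction l generalizing a with
  | nil => cases hs
  | cons h t ih =>
    rcases List.mem_cons.mp hs with hs | hs
    · subst hs
      exact le_trans (le_max_right a s.length) (pvInit_le_foldl_max t _)
    · exact ih _ hs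

-- A's accumulation loop: each step adds the other shape's entry at the fixed resolved index
theorem pvFoldA (M : Nat) (axis : Int)
    (h0 : -(M : Int) ≤ axis) (h1 : axis < (M : Int)) :
    ∀ (L : List (List Int)) (shape : List Int), shape.length = M → (∀ o ∈ L, o.length = M) →
    L.foldl (fun shape other_shape =>
        if axis < (shape.length : Int) then
          PySem.List.pySetD shape axis
            (PySem.List.pyGetD shape axis 0 + PySem.List.pyGetD other_shape axis 0)
        else shape) shape
      = shape.set (if 0 ≤ axis then axis else (M : Int) + axis).toNat
          (shape.getD (if 0 ≤ axis then axis else (M : Int) + axis).toNat 0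
            + (L.map (fun o => o.getD (if 0 ≤ axis then axis else (M : Int) + axis).toNat 0)).sum) := by
  have hiM : (if 0 ≤ axis then axis else (M : Int) + axis).toNat < M := by
    split_ifs with h' <;> omega
  set i : Nat := (if 0 ≤ axis then axis else (M : Int) + axis).toNat with hi
  intro L
  induction L with
  | nil =>
    intro shape hs _
    simpa using (pvSet_getD_self shape i (by omega)).symm
  | cons o L ih =>
    intro shape hs hL
    have hoM : o.length = M := hL o (by simp)
    simp only [List.foldl_cons, List.map_cons, List.sum_cons]
    rw [if_pos (by rw [hs]; exact_mod_cast h1),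
        pvSet_resolve shape axis _ M hs h0 h1,
        pvGet_resolve shape axis M hs h0 h1,
        pvGet_resolve o axis M hoM h0 h1, ← hi]
    rw [ih (shape.set i (shape.getD i 0 + o.getD i 0)) (by simpa using hs)
        (fun o' ho' => hL o' (by simp [ho']))]
    rw [List.set_set]
    congr 1
    have hgd : (shape.set i (shape.getD i 0 + o.getD i 0)).getD i 0
        = shape.getD i 0 + o.getD i 0 := by
      rw [List.getD_eq_getElem _ 0 (by simp only [List.length_set]; omega),
          List.getElem_set_self (by simp only [List.length_set]; omega)]
    rw [hgd]; ring

-- A's loop is the identity when axis is not below the (constant) length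
theorem pvFoldA_id (L : List (List Int)) (shape : List Int) (axis : Int)
    (h : ¬ axis < (shape.length : Int)) :
    L.foldl (fun shape other_shape =>
        if axis < (shape.length : Int) then
          PySem.List.pySetD shape axis
            (PySem.List.pyGetD shape axis 0 + PySem.List.pyGetD other_shape axis 0)
        else shape) shape = shape := by
  induction L with
  | nil => rfl
  | cons o L ih => simp only [List.foldl_cons, if_neg h]; exact ih

-- entry of a 1-padded shape
theorem pvPad_getD (s : List Int) (d i : Nat) :
    (List.replicate d (1 : Int) ++ s).getD i 0
      = if i < d then 1 else s.getD (i - d) 0 := by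
  by_cases h : i < d
  · rw [if_pos h]
    rw [List.getD_eq_getElem _ 0 (by simp; omega)]
    rw [List.getElem_append_left (by simpa using h)]
    simp
  · rw [if_neg h]
    simp only [List.getD]
    rw [List.getElem?_append_right (by simpa using not_lt.mp h)]
    simp

-- ===== VERDICT (by name: the statement is the Claim_ definition above) =====
-- the Int-valued foldl that Pre_ elaborates to equals the Nat-valued one of the ports
theorem pvFoldl_max_cast_aux (l : List (List Int)) (a : Nat) :
    List.foldl (fun m s => max m ((s.length : Nat) : Int)) ((a : Nat) : Int) l
      = ((l.foldl (fun m s => max m s.length) a : Nat) : Int) := by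
  induction l generalizing a with
  | nil => simp
  | cons h t ih => simpa [Nat.cast_max] using ih (max a h.length)

theorem pvFoldl_max_cast (l : List (List Int)) :
    List.foldl (fun m s => max m ((s.length : Nat) : Int)) 0 l
      = ((l.foldl (fun m s => max m s.length) 0 : Nat) : Int) := by
  simpa using pvFoldl_max_cast_aux l 0

theorem normalize_concat_shapes_different_ranks_py_spec : Claim_equal_normalize_concat_shapes_different_ranks_py := by
  intro shape_list axis _ hpre
  obtain ⟨hne, hpre2⟩ := hpre
  cases shape_list with
  | nil => exact absurd rfl hne
  | cons h t =>
  clear hne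
  rw [pvFoldl_max_cast] at hpre2
  unfold Spec_normalize_concat_shapes_different_ranks_py
  unfold normalize_concat_shapes_different_ranks_py
    normalize_concat_shapes_different_ranks_py_alt pvMaxNdimA
  simp only []
  set M : Nat := (h :: t).foldl (fun m s => max m s.length) 0 with hM
  have hhM : h.length ≤ M := pvLen_le_foldl_max _ 0 h (by simp)
  have hpadlen : ∀ s : List Int, s.length ≤ M →
      (List.replicate (M - s.length) (1 : Int) ++ s).length = M := by
    intro s hsM; simp; omega
  simp only [List.map_cons, List.headD_cons, List.drop_succ_cons, List.drop_zero]
  by_cases hax1 : axis < (M : Int)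
  · by_cases hax0 : -(M : Int) ≤ axis
    · -- main case: the loop adds the other shapes' entries at the resolved index
      rw [pvFoldA M axis hax0 hax1
        (t.map fun s => List.replicate (M - s.length) 1 ++ s)
        _ (hpadlen h hhM)
        (by intro o ho; simp only [List.mem_map] at ho
            obtain ⟨s, hs, rfl⟩ := ho
            exact hpadlen s (pvLen_le_foldl_max _ 0 s (by simp [hs])))]
      have key : ∀ (j : Int), j = (if 0 ≤ axis then axis else (M : Int) + axis) →
          ((t.map fun s => List.replicate (M - s.length) 1 ++ s).map
              (fun o => o.getD j.toNat 0)).sum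
            = t.foldl (fun acc s =>
                acc + (if 0 ≤ j - ((M : Int) - (s.length : Int)) then
                         s.getD (j - ((M : Int) - (s.length : Int))).toNat 0
                       else 1)) 0 := by
        intro j hjdef
        have hjge : 0 ≤ j := by rw [hjdef]; split_ifs with h' <;> omega
        have hjlt : j < (M : Int) := by rw [hjdef]; split_ifs with h' <;> omega
        rw [pvFoldl_add_eq, List.map_map, zero_add]
        apply congrArg
        apply List.map_congr_left
        intro s hs
        have hsM : s.length ≤ M := pvLen_le_foldl_max _ 0 s (by simp [hs])
        simp only [Function.comp]
        rw [pvPad_getD]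
        by_cases hc : j.toNat < M - s.length
        · rw [if_pos hc, if_neg (by omega)]
        · rw [if_neg hc, if_pos (by omega)]
          congr 1
          omega
      by_cases h0 : 0 ≤ axis
      · simp only [if_pos h0]
        rw [if_pos (⟨h0, hax1⟩ : 0 ≤ axis ∧ axis < (M : Int))]
        rw [key axis (by rw [if_pos h0])]
      · simp only [if_neg h0]
        rw [if_pos (⟨by omega, by omega⟩ : 0 ≤ (M : Int) + axis ∧ (M : Int) + axis < (M : Int))]
        rw [key ((M : Int) + axis) (by rw [if_neg h0])]
    · -- axis < -M : Pre_ forces a single shape, the loop is empty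
      have ht : t = [] := by
        rcases hpre2 with hlen | hge
        · simpa using hlen
        · omega
      subst ht
      rw [if_neg (by
        rintro ⟨hj0, -⟩
        split_ifs at hj0 with h' <;> omega)]
      simp
  · -- axis ≥ M : no step of A's loop fires, both return the padded first shape
    rw [pvFoldA_id _ _ _ (by rw [hpadlen h hhM]; exact hax1)]
    rw [if_neg (by
      rintro ⟨-, hjlt⟩
      split_ifs at hjlt with h' <;> omega)]
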